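-- pv_equiv track=rewrite | github.com/8fdafs2/Codewars-Solu-Python | src/kyu5_Dont_Drink_the_Water.py | separate_liquids_04
-- ===== SOURCE A (Python) =====
-- from itertools import chain, islice, zip_longest
--
-- def separate_liquids_04(glass):
--     """
--     join + replace + zip_longest
--     """
--     if not glass:
--         return []
--
--     n_cols = len(glass[0])
--
--     liquids = ''.join([''.join(r) for r in glass])
--     liquids = sorted(liquids.replace('H', '3').replace('W', '2').replace('A', '1').replace('O', '0'))
--     liquids = ''.join([''.join(r) for r in liquids])
--     liquids = list(liquids.replace('3', 'H').replace('2', 'W').replace('1', 'A').replace('0', 'O'))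
--
--     return [list(r) for r in zip_longest(*[iter(liquids)] * n_cols)]
-- ===== SOURCE B (Python) =====
-- def separate_liquids_04(glass):
--     # Counting sort over the 128 ASCII codes (after the density remap), then reshape.
--     if not glass:
--         return []
--     n_cols = len(glass[0])
--     if n_cols == 0:
--         return []
--     fwd = {'H': '3', 'W': '2', 'A': '1', 'O': '0'}
--     back = {'3': 'H', '2': 'W', '1': 'A', '0': 'O'}
--     counts = [0] * 128
--     for row in glass:
--         for cell in row:
--             for ch in cell:
--                 counts[ord(fwd.get(ch, ch))] += 1
--     out_chars = []
--     for code in range(128):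
--         out_chars.extend([back.get(chr(code), chr(code))] * counts[code])
--     rows = []
--     i = 0
--     while i < len(out_chars):
--         chunk = out_chars[i:i + n_cols]
--         rows.append(chunk + [None] * (n_cols - len(chunk)))
--         i += n_cols
--     return rows
-- ===== Notes on version B (the rewrite author's own statement) =====
-- stated objective: faster
-- what changed: B replaces A's join/replace/comparison-sort (sorted over the density-remapped characters) by a single counting pass over 128 ASCII buckets followed by a direct emit-in-code-order and an explicit slicing reshape, removing the O(n log n) sort.
import Mathlib
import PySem

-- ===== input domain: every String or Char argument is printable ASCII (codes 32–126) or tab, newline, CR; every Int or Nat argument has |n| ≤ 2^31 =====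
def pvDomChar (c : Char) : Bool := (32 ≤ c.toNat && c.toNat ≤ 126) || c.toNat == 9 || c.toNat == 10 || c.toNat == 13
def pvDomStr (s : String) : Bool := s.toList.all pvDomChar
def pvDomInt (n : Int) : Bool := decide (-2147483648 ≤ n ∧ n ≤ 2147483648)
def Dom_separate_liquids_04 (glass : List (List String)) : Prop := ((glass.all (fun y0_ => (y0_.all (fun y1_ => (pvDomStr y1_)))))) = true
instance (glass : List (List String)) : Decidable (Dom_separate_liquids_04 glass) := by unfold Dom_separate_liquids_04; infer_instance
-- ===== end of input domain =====

-- B replaces A's comparison sort (sorted over the density-remapped characters) by a counting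
-- sort over the 128 ASCII codes plus a direct reshape: asymptotically O(n) instead of O(n log n).

-- ===== PORT A =====
-- zip_longest(*[iter(l)]*n): each row pulls the next n items of the iterator (None once it is
-- exhausted); the loop stops when the FIRST pull of a row finds the iterator empty. Exact port.
def pvChunkA (l : List String) (n : Nat) : List (List (Option String)) :=
  if _h : n = 0 then []
  else
    match l with
    | [] => []
    | x :: xs => ((List.range n).map (fun i => (x :: xs)[i]?)) :: pvChunkA ((x :: xs).drop n) n
termination_by l.length
decreasing_by simp; omega

def separate_liquids_04 (glass : List (List String)) : List (List (Option String)) :=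
  if glass = [] then []
  else
    let n_cols := (glass.headD []).length
    let liquids := PySem.Str.join "" (glass.map (fun r => PySem.Str.join "" r))
    let l2 := PySem.Str.replace (PySem.Str.replace (PySem.Str.replace
                (PySem.Str.replace liquids "H" "3") "W" "2") "A" "1") "O" "0"
    -- sorted(str) compares the 1-character strings, i.e. the characters themselves
    let sortedCs := PySem.List.sorted l2.toList (fun x => x) false
    let l3 := String.ofList sortedCs
    let l4 := PySem.Str.replace (PySem.Str.replace (PySem.Str.replace
                (PySem.Str.replace l3 "3" "H") "2" "W") "1" "A") "0" "O"
    pvChunkA (l4.toList.map (fun c => String.ofList [c])) n_cols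

-- ===== PORT B =====
def pvFwd (c : Char) : Char :=
  if c = 'H' then '3' else if c = 'W' then '2' else if c = 'A' then '1' else if c = 'O' then '0' else c

def pvBack (c : Char) : Char :=
  if c = '3' then 'H' else if c = '2' then 'W' else if c = '1' then 'A' else if c = '0' then 'O' else c

-- 'i = 0; while i < len(out_chars): chunk = out_chars[i:i + n_cols]; rows.append(…); i += n_cols'
def pvChunkB (l : List String) (n : Nat) (i : Nat) : List (List (Option String)) :=
  if _h0 : n = 0 then []   -- unreachable: the caller returns early when n_cols = 0
  else if h : i < l.length then
    (let chunk := PySem.List.slice l (some (i : Int)) (some (((i + n : Nat)) : Int))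
     chunk.map some ++ List.replicate (n - chunk.length) none) :: pvChunkB l n (i + n)
  else []
termination_by l.length - i
decreasing_by omega

def separate_liquids_04_alt (glass : List (List String)) : List (List (Option String)) :=
  if glass = [] then []
  else
    let n_cols := (glass.headD []).length
    if n_cols = 0 then []
    else
      let counts : List Nat :=
        glass.foldl (fun cs row =>
          row.foldl (fun cs cell =>
            cell.toList.foldl (fun cs ch => cs.modify (pvFwd ch).toNat (· + 1)) cs) cs)
          (List.replicate 128 0)
      let outChars : List Char :=
        (List.range 128).foldl
          (fun acc code => acc ++ List.replicate (counts.getD code 0) (pvBack (Char.ofNat code))) []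
      pvChunkB (outChars.map (fun c => String.ofList [c])) n_cols 0

-- ===== PRECONDITION & SPEC =====
def Spec_separate_liquids_04 (glass : List (List String)) (out : List (List (Option String))) : Prop := out = separate_liquids_04_alt glass
instance (glass : List (List String)) (out : List (List (Option String))) : Decidable (Spec_separate_liquids_04 glass out) := by unfold Spec_separate_liquids_04; infer_instance

-- ===== CLAIM (what is proved, stated in full; the proofs are below) =====
def Claim_equal_separate_liquids_04 : Prop := ∀ (glass : List (List String)), Dom_separate_liquids_04 glass → Spec_separate_liquids_04 glass (separate_liquids_04 glass)

-- ===== LEMMAS AND PROOFS =====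

theorem toNat_ofNat_small (i : Nat) (h : i < 128) : (Char.ofNat i).toNat = i := by
  rw [Char.toNat_ofNat]; rw [if_pos]; exact Or.inl (by omega)

theorem ofNat_le_ofNat (i j : Nat) (hi : i < 128) (hj : j < 128) (hij : i ≤ j) :
    Char.ofNat i ≤ Char.ofNat j := by
  rw [Char.le_def, UInt32.le_iff_toNat_le]
  show (Char.ofNat i).toNat ≤ (Char.ofNat j).toNat
  rw [toNat_ofNat_small i hi, toNat_ofNat_small j hj]; exact hij

theorem ofNat_eq_iff (i : Nat) (c : Char) (h : i < 128) : Char.ofNat i = c ↔ i = c.toNat := by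
  constructor
  · rintro rfl; exact (toNat_ofNat_small i h).symm
  · rintro rfl; exact Char.ofNat_toNat c

theorem toNat_injective : Function.Injective Char.toNat := by
  intro a b h
  have := congrArg Char.ofNat h
  rwa [Char.ofNat_toNat, Char.ofNat_toNat] at this

-- single-character str.replace is a character map
theorem replace_go_single (a b : Char) : ∀ (fuel : Nat) (l acc : List Char), l.length ≤ fuel →
    PySem.Chars.replace.go [a] [b] fuel l acc = acc.reverse ++ l.map (fun c => if c = a then b else c) := by
  intro fuel
  induction fuel with
  | zero => intro l acc h; rw [List.length_eq_zero_iff.mp (Nat.le_zero.mp h)]; simp [PySem.Chars.replace.go]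
  | succ n ih =>
    intro l acc h
    cases l with
    | nil => simp [PySem.Chars.replace.go]
    | cons c t =>
      rw [PySem.Chars.replace.go]
      simp only [List.length_cons] at h
      by_cases hc : c = a
      · subst hc
        rw [if_pos (by simp [List.isPrefixOf])]
        rw [ih _ _ (by simp; omega)]
        simp
      · rw [if_neg (by simp [List.isPrefixOf]; exact fun e => hc e.symm)]
        rw [ih _ _ (by omega)]
        simp [hc]

theorem replace_single (a b : Char) (l : List Char) :
    PySem.Chars.replace l [a] [b] = l.map (fun c => if c = a then b else c) := by
  rw [PySem.Chars.replace]
  rw [if_neg (by simp)]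
  exact replace_go_single a b l.length l [] le_rfl

theorem map_fwd (l : List Char) :
    ((((l.map (fun c => if c = 'H' then '3' else c)).map (fun c => if c = 'W' then '2' else c)).map
        (fun c => if c = 'A' then '1' else c)).map (fun c => if c = 'O' then '0' else c))
      = l.map pvFwd := by
  simp only [List.map_map]
  apply List.map_congr_left
  intro c _
  simp only [Function.comp, pvFwd]
  split_ifs <;> simp_all

theorem map_back (l : List Char) :
    ((((l.map (fun c => if c = '3' then 'H' else c)).map (fun c => if c = '2' then 'W' else c)).map
        (fun c => if c = '1' then 'A' else c)).map (fun c => if c = '0' then 'O' else c))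
      = l.map pvBack := by
  simp only [List.map_map]
  apply List.map_congr_left
  intro c _
  simp only [Function.comp, pvBack]
  split_ifs <;> simp_all

theorem intercalate_nil (L : List (List Char)) : List.intercalate [] L = L.flatten := by
  induction L with
  | nil => rfl
  | cons a t ih => cases t <;> simp_all [List.intercalate]

-- the counting loop: each slot counts its code
theorem foldl_modify_getD (l : List Char) : ∀ (cs : List Nat) (i : Nat), i < cs.length →
    (l.foldl (fun cs ch => cs.modify (pvFwd ch).toNat (· + 1)) cs).getD i 0
      = cs.getD i 0 + (l.map (fun ch => (pvFwd ch).toNat)).count i := by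
  induction l with
  | nil => intro cs i _; simp
  | cons c t ih =>
    intro cs i hi
    simp only [List.foldl_cons, List.map_cons]
    rw [ih _ i (by rwa [List.length_modify])]
    rw [List.count_cons]
    have hmod : (cs.modify (pvFwd c).toNat (· + 1)).getD i 0
        = cs.getD i 0 + (if ((pvFwd c).toNat == i) = true then 1 else 0) := by
      simp only [List.getD_eq_getElem?_getD, List.getElem?_modify]
      by_cases he : (pvFwd c).toNat = i
      · simp [he, List.getElem?_eq_getElem hi]
      · simp [he]
    rw [hmod]; omega

theorem sum_map_range_ite (f : Nat → Nat) (t : Nat) : ∀ (n : Nat),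
    ((List.range n).map (fun i => if i = t then f i else 0)).sum = if t < n then f t else 0 := by
  intro n
  induction n with
  | zero => simp
  | succ m ih =>
    rw [List.range_succ, List.map_append, List.sum_append, ih]
    by_cases h : t < m
    · rw [if_pos h, if_pos (by omega)]
      simp only [List.map_cons, List.map_nil, List.sum_cons, List.sum_nil]
      rw [if_neg (by omega : ¬ m = t)]
      omega
    · by_cases h2 : m = t
      · subst h2; simp
      · rw [if_neg h, if_neg (by omega)]
        simp [h2]

theorem count_blocks (m : List Char) (hm : ∀ c ∈ m, c.toNat < 128) (c : Char) :
    ((List.range 128).flatMap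
        (fun i => List.replicate ((m.map Char.toNat).count i) (Char.ofNat i))).count c
      = m.count c := by
  rw [List.flatMap_def, List.count_flatten, List.map_map]
  have hcong : (List.range 128).map
        ((fun l => List.count c l) ∘ fun i => List.replicate ((m.map Char.toNat).count i) (Char.ofNat i))
      = (List.range 128).map (fun i => if i = c.toNat then (m.map Char.toNat).count i else 0) := by
    apply List.map_congr_left
    intro i hi
    have hi128 : i < 128 := List.mem_range.mp hi
    simp only [Function.comp, List.count_replicate]
    by_cases he : i = c.toNat
    · simp [he]
    · have : ¬ (Char.ofNat i = c) := fun hh => he ((ofNat_eq_iff i c hi128).mp hh)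
      simp [he, beq_iff_eq, this]
  rw [hcong, sum_map_range_ite]
  by_cases hc : c.toNat < 128
  · rw [if_pos hc]
    have := List.count_map_of_injective m Char.toNat toNat_injective c
    simpa using this
  · rw [if_neg hc]
    symm
    rw [List.count_eq_zero]
    intro hmem
    exact hc (hm c hmem)

theorem pairwise_blocks (m : List Char) :
    ((List.range 128).flatMap
        (fun i => List.replicate ((m.map Char.toNat).count i) (Char.ofNat i))).Pairwise (· ≤ ·) := by
  rw [List.flatMap_def]
  rw [List.pairwise_flatten]
  constructor
  · intro l hl
    simp only [List.mem_map] at hl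
    obtain ⟨i, _, rfl⟩ := hl
    rw [List.pairwise_replicate]
    exact Or.inr le_rfl
  · rw [List.pairwise_map]
    apply List.Pairwise.imp_of_mem ?_ List.pairwise_lt_range
    intro i j hi hj hij x hx y hy
    rw [List.eq_of_mem_replicate hx, List.eq_of_mem_replicate hy]
    exact ofNat_le_ofNat i j (List.mem_range.mp hi) (List.mem_range.mp hj) (Nat.le_of_lt hij)

-- the sorted remapped characters ARE the counting-sort blocks
theorem sorted_eq_blocks (m : List Char) (hm : ∀ c ∈ m, c.toNat < 128) :
    PySem.List.sorted m (fun x => x) false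
      = (List.range 128).flatMap
          (fun i => List.replicate ((m.map Char.toNat).count i) (Char.ofNat i)) := by
  exact PySem.List.sorted_id_eq_of_perm_of_pairwise m _
    (List.perm_iff_count.mpr (fun c => count_blocks m hm c)) (pairwise_blocks m)

-- the zip_longest row equals the padded take
theorem range_map_getElem? (l : List String) : ∀ (n : Nat),
    (List.range n).map (fun i => l[i]?) = (l.take n).map some ++ List.replicate (n - l.length) none := by
  induction l with
  | nil =>
    intro n
    simp [List.map_const']
  | cons c t ih =>
    intro n
    cases n with
    | zero => simp
    | succ m =>
      rw [List.range_succ_eq_map]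
      simp only [List.map_cons, List.map_map, List.take_succ_cons, List.length_cons]
      have : (List.range m).map ((fun i => (c :: t)[i]?) ∘ Nat.succ) = (List.range m).map (fun i => t[i]?) := by
        apply List.map_congr_left; intro i _; simp
      rw [this, ih m]
      simp [Nat.succ_sub_succ]

theorem chunk_eq (n : Nat) (l : List String) : ∀ (i : Nat), pvChunkA (l.drop i) n = pvChunkB l n i := by
  intro i
  induction hk : l.length - i using Nat.strong_induction_on generalizing i with
  | _ k ih =>
    rw [pvChunkA.eq_def, pvChunkB.eq_def]
    by_cases hn : n = 0
    · simp [hn]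
    · rw [dif_neg hn, dif_neg hn]
      by_cases hi : i < l.length
      · rw [dif_pos hi]
        cases hd : l.drop i with
        | nil => exfalso; have := congrArg List.length hd; simp at this; omega
        | cons x xs =>
          show (List.range n).map (fun j => (x :: xs)[j]?) :: pvChunkA (List.drop n (x :: xs)) n
            = ((PySem.List.slice l (some (i : Int)) (some ((i + n : Nat) : Int))).map some
                ++ List.replicate (n - (PySem.List.slice l (some (i : Int)) (some ((i + n : Nat) : Int))).length) none)
              :: pvChunkB l n (i + n)
          rw [PySem.List.slice_natCast l i (i + n)]
          rw [show i + n - i = n from by omega, hd]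
          congr 1
          · rw [range_map_getElem?]
            congr 2
            simp
            omega
          · rw [show List.drop n (x :: xs) = List.drop (i + n) l from by
                rw [← hd, List.drop_drop]; try (congr 1; omega)]
            subst hk
            exact ih (l.length - (i + n)) (by omega) (i + n) rfl
      · rw [dif_neg hi]
        rw [List.drop_eq_nil_of_le (by omega)]

theorem dom_fwd_lt (c : Char) (h : pvDomChar c = true) : (pvFwd c).toNat < 128 := by
  unfold pvFwd
  split_ifs <;> (simp_all [pvDomChar]; try omega)


theorem dom_mem (glass : List (List String)) (hdom : Dom_separate_liquids_04 glass) :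
    ∀ ch ∈ (glass.map (fun row => (row.map String.toList).flatten)).flatten, pvDomChar ch = true := by
  intro ch h
  simp only [List.mem_flatten, List.mem_map] at h
  obtain ⟨l, ⟨row, hrow, rfl⟩, hch⟩ := h
  simp only [List.mem_flatten, List.mem_map] at hch
  obtain ⟨cl, ⟨cell, hcell, rfl⟩, hch⟩ := hch
  unfold Dom_separate_liquids_04 at hdom
  simp only [List.all_eq_true] at hdom
  have := hdom row hrow cell hcell
  unfold pvDomStr at this
  exact List.all_eq_true.mp this ch hch

theorem join_toList (glass : List (List String)) :
    (PySem.Str.join "" (glass.map (fun r => PySem.Str.join "" r))).toList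
      = (glass.map (fun row => (row.map String.toList).flatten)).flatten := by
  rw [PySem.Str.toList_join, List.map_map]
  show PySem.Chars.join [] _ = _
  unfold PySem.Chars.join
  rw [intercalate_nil]
  congr 1
  apply List.map_congr_left
  intro r _
  show (PySem.Str.join "" r).toList = (r.map String.toList).flatten
  rw [PySem.Str.toList_join]
  show PySem.Chars.join [] _ = _
  unfold PySem.Chars.join
  rw [intercalate_nil]

theorem fwd_toList (glass : List (List String)) :
    (PySem.Str.replace (PySem.Str.replace (PySem.Str.replace
        (PySem.Str.replace (PySem.Str.join "" (glass.map (fun r => PySem.Str.join "" r)))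
          "H" "3") "W" "2") "A" "1") "O" "0").toList
      = ((glass.map (fun row => (row.map String.toList).flatten)).flatten).map pvFwd := by
  simp only [PySem.Str.toList_replace]
  rw [show ("H" : String).toList = ['H'] by decide, show ("3" : String).toList = ['3'] by decide,
      show ("W" : String).toList = ['W'] by decide, show ("2" : String).toList = ['2'] by decide,
      show ("A" : String).toList = ['A'] by decide, show ("1" : String).toList = ['1'] by decide,
      show ("O" : String).toList = ['O'] by decide, show ("0" : String).toList = ['0'] by decide]
  rw [replace_single, replace_single, replace_single, replace_single, join_toList, map_fwd]

theorem back_toList (s : String) (m : List Char) (hs : s.toList = m) :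
    (PySem.Str.replace (PySem.Str.replace (PySem.Str.replace
        (PySem.Str.replace s "3" "H") "2" "W") "1" "A") "0" "O").toList
      = m.map pvBack := by
  simp only [PySem.Str.toList_replace]
  rw [show ("H" : String).toList = ['H'] by decide, show ("3" : String).toList = ['3'] by decide,
      show ("W" : String).toList = ['W'] by decide, show ("2" : String).toList = ['2'] by decide,
      show ("A" : String).toList = ['A'] by decide, show ("1" : String).toList = ['1'] by decide,
      show ("O" : String).toList = ['O'] by decide, show ("0" : String).toList = ['0'] by decide]
  rw [replace_single, replace_single, replace_single, replace_single, hs, map_back]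

theorem counts_eq (glass : List (List String)) :
    glass.foldl (fun cs row =>
        row.foldl (fun cs cell =>
          cell.toList.foldl (fun cs ch => cs.modify (pvFwd ch).toNat (· + 1)) cs) cs)
        (List.replicate 128 0)
      = ((glass.map (fun row => (row.map String.toList).flatten)).flatten).foldl
          (fun cs ch => cs.modify (pvFwd ch).toNat (· + 1)) (List.replicate 128 0) := by
  rw [List.foldl_flatten, List.foldl_map]
  congr 1
  funext a row
  rw [List.foldl_flatten, List.foldl_map]

theorem outChars_eq (glass : List (List String)) (hdom : Dom_separate_liquids_04 glass) :
    (List.range 128).foldl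
        (fun acc code => acc ++ List.replicate
          ((glass.foldl (fun cs row =>
            row.foldl (fun cs cell =>
              cell.toList.foldl (fun cs ch => cs.modify (pvFwd ch).toNat (· + 1)) cs) cs)
            (List.replicate 128 0)).getD code 0) (pvBack (Char.ofNat code))) []
      = (PySem.List.sorted
          (((glass.map (fun row => (row.map String.toList).flatten)).flatten).map pvFwd)
          (fun x => x) false).map pvBack := by
  have hm : ∀ c ∈ ((glass.map (fun row => (row.map String.toList).flatten)).flatten).map pvFwd,
      c.toNat < 128 := by
    intro c hc
    obtain ⟨ch, hch, rfl⟩ := List.mem_map.mp hc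
    exact dom_fwd_lt ch (dom_mem glass hdom ch hch)
  rw [PySem.List.foldl_append_eq_flatMap, List.nil_append]
  rw [sorted_eq_blocks _ hm, List.map_flatMap]
  simp only [List.map_replicate]
  rw [List.flatMap_def, List.flatMap_def]
  congr 1
  apply List.map_congr_left
  intro code hcode
  rw [counts_eq]
  rw [foldl_modify_getD _ _ code (by simp [List.mem_range.mp hcode])]
  rw [List.getD_eq_getElem?_getD, List.getElem?_replicate, if_pos (List.mem_range.mp hcode)]
  simp only [Option.getD_some, Nat.zero_add]
  congr 1
  rw [List.map_map]
  rfl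

-- ===== VERDICT (by name: the statement is the Claim_ definition above) =====
theorem separate_liquids_04_spec : Claim_equal_separate_liquids_04 := by
  intro glass hdom
  unfold Spec_separate_liquids_04 separate_liquids_04 separate_liquids_04_alt
  by_cases hg : glass = []
  · simp [hg]
  · rw [if_neg hg, if_neg hg]
    by_cases hn : (glass.headD []).length = 0
    · rw [if_pos hn]
      rw [hn, pvChunkA.eq_def]
      simp
    · rw [if_neg hn]
      show pvChunkA ((PySem.Str.replace (PySem.Str.replace (PySem.Str.replace (PySem.Str.replace
            (String.ofList (PySem.List.sorted (PySem.Str.replace (PySem.Str.replace (PySem.Str.replace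
              (PySem.Str.replace (PySem.Str.join "" (glass.map (fun r => PySem.Str.join "" r))) "H" "3")
              "W" "2") "A" "1") "O" "0").toList (fun x => x) false))
            "3" "H") "2" "W") "1" "A") "0" "O").toList.map (fun c => String.ofList [c])) (glass.headD []).length
        = pvChunkB (((List.range 128).foldl (fun acc code => acc ++ List.replicate
            ((glass.foldl (fun cs row => row.foldl (fun cs cell =>
                cell.toList.foldl (fun cs ch => cs.modify (pvFwd ch).toNat (· + 1)) cs) cs)
              (List.replicate 128 0)).getD code 0) (pvBack (Char.ofNat code))) []).map
            (fun c => String.ofList [c])) (glass.headD []).length 0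
      rw [back_toList _ _ (by rw [String.toList_ofList, fwd_toList])]
      rw [outChars_eq glass hdom]
      exact chunk_eq _ _ 0
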